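-- pv_equiv track=rewrite | github.com/pstoermer/bacterial_srna_regulation_statement_extraction | 01_src/preprocessing_utils.py | assign_custom_ner_tags_with_spans
-- ===== SOURCE A (Python) =====
-- from typing import Dict, List, Optional, Tuple, Union
--
-- def assign_custom_ner_tags_with_spans(text:str, entity_dict:Dict[str, List[str]])->List[Tuple[int, int, str]]:
--     """
--     Assign custom Named Entity Recognition (NER) tags to entities found in the text.
--
--     Parameters:
--     - text (str): The input text.
--     - entity_dict (Dict[str, List[str]]): A dictionary with entity types as keys and lists of entities as values.
--
--     Returns:
--     - List[List[int,int,str]]: A list of tuples containing the start and end character positions and the entity type.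
--     """
--     entities = []
--     sorted_entities = sorted([(entity, label) for label, words in entity_dict.items() for entity in words],
--                              key=lambda x: len(x[0]), reverse=True)
--
--     for entity, label in sorted_entities:
--         start = text.lower().find(entity.lower())
--         while start != -1:
--             end = start + len(entity)
--             # Ensure the entity doesn't start or end in the middle of another word
--             if (start == 0 or not text[start-1].isalnum()) and (end == len(text) or not text[end].isalnum()):
--                 entities.append((start, end, label))
--             start = text.find(entity, start + 1)
--
--     return entities
-- ===== SOURCE B (Python) =====
-- def assign_custom_ner_tags_with_spans(text, entity_dict):
--     low = text.lower()
--     n = len(text)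
--     pairs = sorted([(e, lab) for lab, ws in entity_dict.items() for e in ws],
--                    key=lambda p: len(p[0]), reverse=True)
--     lengths = sorted({len(e) for e, _ in pairs})
--     targets = {e.lower() for e, _ in pairs}
--     # one position-major pass over the text: at every start that does not fall
--     # inside a word, group the boundary-respecting matches by their lowered form
--     hits = {}
--     for i in range(n + 1):
--         if i > 0 and text[i - 1].isalnum():
--             continue
--         for m in lengths:
--             j = i + m
--             if j <= n and (j == n or not text[j].isalnum()):
--                 s = low[i:j]
--                 if s in targets:
--                     hits.setdefault(s, []).append(i)
--     return [(i, i + len(e), lab) for e, lab in pairs for i in hits.get(e.lower(), [])]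
-- ===== Notes on version B (the rewrite author's own statement) =====
-- stated objective: faster
-- what changed: B inverts the loop structure: instead of A's entity-major scans that re-lowercase the whole text and re-run str.find for every entity, B lowercases once and makes one position-major pass over the text, grouping every boundary-valid case-insensitive match by its lowered form in a dict, then emits spans per sorted entity by dict lookup; B is fully case-insensitive, fixing A's accidental case-sensitive subsequent searches.
-- intended difference: On texts where some entity has a word-boundary case-insensitive occurrence, beyond its first occurrence, whose text differs in case from the entity literal, A omits that span (only A's first search is case-insensitive; later searches use case-sensitive text.find) while B reports every case-insensitive occurrence, the evident intent of A's text.lower().find(entity.lower()). — e.g. on assign_custom_ner_tags_with_spans("ab Ab", [("T", ["ab"])]): A returns [(0, 2, "T")], B returns [(0, 2, "T"), (3, 5, "T")]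
import Mathlib
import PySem

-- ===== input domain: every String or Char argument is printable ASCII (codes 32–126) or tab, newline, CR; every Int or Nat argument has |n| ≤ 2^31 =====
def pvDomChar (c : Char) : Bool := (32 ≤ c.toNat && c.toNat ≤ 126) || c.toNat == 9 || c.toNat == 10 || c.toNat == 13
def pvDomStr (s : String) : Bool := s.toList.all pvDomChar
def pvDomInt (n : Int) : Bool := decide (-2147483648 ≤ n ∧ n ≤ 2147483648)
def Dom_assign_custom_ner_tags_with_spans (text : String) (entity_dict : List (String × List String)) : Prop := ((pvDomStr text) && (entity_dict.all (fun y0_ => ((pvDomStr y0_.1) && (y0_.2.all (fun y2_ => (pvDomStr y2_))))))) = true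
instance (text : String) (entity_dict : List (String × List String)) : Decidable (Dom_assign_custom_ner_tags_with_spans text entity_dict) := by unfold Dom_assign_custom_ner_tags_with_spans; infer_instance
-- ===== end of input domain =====

-- B replaces A's entity-major repeated-find scans (which re-lowercase the text per entity)
-- with one lowercasing plus one position-major pass grouping boundary-valid case-insensitive
-- matches by lowered form in a dict (measured faster in a timing run); B is fully
-- case-insensitive, intentionally fixing A's case-sensitive later searches (see D_ below).

-- ===== PORT A =====
-- the 'while start != -1' loop of A; fuel (text.length + 2 at the call site) only makes the
-- recursion structural — it is never exhausted on the actual call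
def pvAWhile (t e : List Char) (lbl : String) : Nat → Int → List (Int × Int × String) → List (Int × Int × String)
  | 0, _, acc => acc
  | fuel+1, start, acc =>
    if start = -1 then acc
    else
      let endp := start + (e.length : Int)
      let acc' := if ((start == 0) || !(PySem.Chars.isalnum (PySem.List.pyGetD t (start - 1) ' '))) &&
                     ((endp == (t.length : Int)) || !(PySem.Chars.isalnum (PySem.List.pyGetD t endp ' '))) then
                    acc ++ [(start, endp, lbl)] else acc
      pvAWhile t e lbl fuel (PySem.Chars.findFrom t e (start + 1)) acc'

def assign_custom_ner_tags_with_spans (text : String) (entity_dict : List (String × List String)) : List (Int × Int × String) :=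
  let sorted_entities := PySem.List.sorted
    ((PySem.Dict.ofList entity_dict).items.flatMap (fun lw => lw.2.map (fun e => (e, lw.1))))
    (fun x => PySem.Str.len x.1) true
  sorted_entities.foldl (fun entities el =>
    pvAWhile text.toList el.1.toList el.2 (text.toList.length + 2)
      (PySem.Chars.find (PySem.Chars.lower text.toList) (PySem.Chars.lower el.1.toList)) entities) []

-- ===== PORT B =====
-- Source B's dict is keyed by the lowered slices; the port keys it by their List Char form
-- (String ↔ List Char is a pure representation choice, exact here);
-- hits.setdefault(s, []).append(i) is Dict.modify s [] (· ++ [i])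
def assign_custom_ner_tags_with_spans_alt (text : String) (entity_dict : List (String × List String)) : List (Int × Int × String) :=
  let t := text.toList
  let low := PySem.Chars.lower t
  let n : Int := t.length
  let pairs := PySem.List.sorted
    ((PySem.Dict.ofList entity_dict).items.flatMap (fun lw => lw.2.map (fun e => (e, lw.1))))
    (fun p => PySem.Str.len p.1) true
  let lengths := PySem.List.sorted (PySem.Set.ofList (pairs.map (fun p => PySem.Str.len p.1))) (fun x => x) false
  let targets : PySem.Set (List Char) := PySem.Set.ofList (pairs.map (fun p => PySem.Chars.lower p.1.toList))
  let hits : PySem.Dict (List Char) (List Int) :=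
    (PySem.List.pyRange 0 (n + 1)).foldl (fun d i =>
      if (0 < i) && PySem.Chars.isalnum (PySem.List.pyGetD t (i - 1) ' ') then d
      else lengths.foldl (fun d m =>
        let j := i + m
        if decide (j ≤ n) && ((j == n) || !(PySem.Chars.isalnum (PySem.List.pyGetD t j ' '))) then
          let s := PySem.List.slice low (some i) (some j)
          if targets.contains s then d.modify s [] (· ++ [i]) else d
        else d) d) PySem.Dict.empty
  pairs.flatMap (fun el =>
    (hits.getD (PySem.Chars.lower el.1.toList) []).map (fun i => (i, i + PySem.Str.len el.1, el.2)))

-- ===== PRECONDITION & SPEC =====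
-- entity e has a word-boundary case-insensitive occurrence in t, after e's first
-- case-insensitive occurrence, whose text is not exactly e
def pvBadHit (t e : List Char) : Bool :=
  let low := PySem.Chars.lower t
  let k := PySem.Chars.lower e
  (List.range (t.length + 1)).any fun i => decide (
    PySem.Chars.find low k < (i : Int) ∧ k <+: low.drop i ∧ ¬ e <+: t.drop i ∧
    PySem.Chars.isalnum ((' ' :: t).getD i ' ') = false ∧
    PySem.Chars.isalnum (t.getD (i + e.length) ' ') = false)

-- On inputs where some entity has a word-boundary case-insensitive occurrence, other than its
-- first one, whose text differs in case from the entity literal, A omits that span (only A's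
-- FIRST search is case-insensitive; the later ones use case-sensitive text.find) while B
-- reports every case-insensitive occurrence — the evident intent of A's
-- text.lower().find(entity.lower()).
def D_assign_custom_ner_tags_with_spans (text : String) (entity_dict : List (String × List String)) : Prop :=
  ((PySem.Dict.ofList entity_dict).items.any (fun lw =>
    lw.2.any (fun e => pvBadHit text.toList e.toList))) = true
instance (text : String) (entity_dict : List (String × List String)) : Decidable (D_assign_custom_ner_tags_with_spans text entity_dict) := by unfold D_assign_custom_ner_tags_with_spans; infer_instance

def Spec_assign_custom_ner_tags_with_spans (text : String) (entity_dict : List (String × List String)) (out : List (Int × Int × String)) : Prop := ¬ D_assign_custom_ner_tags_with_spans text entity_dict → out = assign_custom_ner_tags_with_spans_alt text entity_dict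
instance (text : String) (entity_dict : List (String × List String)) (out : List (Int × Int × String)) : Decidable (Spec_assign_custom_ner_tags_with_spans text entity_dict out) := by unfold Spec_assign_custom_ner_tags_with_spans; infer_instance

def pvDiffWitness_assign_custom_ner_tags_with_spans : String × (List (String × List String)) := ("ab Ab", [("T", ["ab"])])
def pvDiffWitnessOut_assign_custom_ner_tags_with_spans : (List (Int × Int × String)) × (List (Int × Int × String)) := ([(0, 2, "T")], [(0, 2, "T"), (3, 5, "T")])

-- ===== CLAIM (what is proved, stated in full; the proofs are below) =====
def Claim_unchanged_assign_custom_ner_tags_with_spans : Prop := ∀ (text : String) (entity_dict : List (String × List String)), Dom_assign_custom_ner_tags_with_spans text entity_dict → Spec_assign_custom_ner_tags_with_spans text entity_dict (assign_custom_ner_tags_with_spans text entity_dict)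
def Claim_changed_assign_custom_ner_tags_with_spans : Prop := Dom_assign_custom_ner_tags_with_spans (pvDiffWitness_assign_custom_ner_tags_with_spans.1) (pvDiffWitness_assign_custom_ner_tags_with_spans.2) ∧ D_assign_custom_ner_tags_with_spans (pvDiffWitness_assign_custom_ner_tags_with_spans.1) (pvDiffWitness_assign_custom_ner_tags_with_spans.2) ∧ assign_custom_ner_tags_with_spans (pvDiffWitness_assign_custom_ner_tags_with_spans.1) (pvDiffWitness_assign_custom_ner_tags_with_spans.2) = pvDiffWitnessOut_assign_custom_ner_tags_with_spans.1 ∧ assign_custom_ner_tags_with_spans_alt (pvDiffWitness_assign_custom_ner_tags_with_spans.1) (pvDiffWitness_assign_custom_ner_tags_with_spans.2) = pvDiffWitnessOut_assign_custom_ner_tags_with_spans.2 ∧ pvDiffWitnessOut_assign_custom_ner_tags_with_spans.1 ≠ pvDiffWitnessOut_assign_custom_ner_tags_with_spans.2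
def Claim_exact_assign_custom_ner_tags_with_spans : Prop := ∀ (text : String) (entity_dict : List (String × List String)), Dom_assign_custom_ner_tags_with_spans text entity_dict → D_assign_custom_ner_tags_with_spans text entity_dict → assign_custom_ner_tags_with_spans text entity_dict ≠ assign_custom_ner_tags_with_spans_alt text entity_dict

-- ===== LEMMAS AND PROOFS =====

-- slice-compare at a natural position is the prefix test
lemma pvPredSlice (s e : List Char) (j : Nat) :
    (PySem.List.slice s (some (j : Int)) (some ((j : Int) + (e.length : Int))) == e) =
      decide (e <+: s.drop j) := by
  rw [PySem.List.slice_natCast_add, Bool.eq_iff_iff]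
  simp only [beq_iff_eq, decide_eq_true_eq, List.prefix_iff_eq_take]
  exact eq_comm

-- a region with no occurrence filters to nothing
lemma pvFilterNil (s e : List Char) (k : Nat) (h : ¬ e <:+: s.drop k) :
    (PySem.List.pyRange (k : Int) ((s.length : Int) + 1)).filter
      (fun i => PySem.List.slice s (some i) (some (i + (e.length : Int))) == e) = [] := by
  apply List.filter_eq_nil_iff.mpr
  intro i hi
  have hm := PySem.List.mem_pyRange_one.mp hi
  have hj : i = ((i.toNat : Nat) : Int) := by omega
  rw [hj, pvPredSlice]
  simp only [decide_eq_true_eq]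
  intro hpre
  apply h
  apply (PySem.Chars.isIn_iff_infix _ _).mp
  apply (PySem.Chars.exists_prefix_drop_iff_isIn _ _).mp
  exact ⟨i.toNat - k, by
    rw [List.drop_drop, show k + (i.toNat - k) = i.toNat by omega]; exact hpre⟩

-- the first occurrence at position q heads the filtered range
lemma pvFilterCons (s e : List Char) (k q : Nat) (hk : k ≤ q) (hq : q ≤ s.length)
    (hpre : e <+: s.drop q) (hmin : ∀ j, k ≤ j → j < q → ¬ e <+: s.drop j) :
    (PySem.List.pyRange (k : Int) ((s.length : Int) + 1)).filter
      (fun i => PySem.List.slice s (some i) (some (i + (e.length : Int))) == e) =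
    (q : Int) :: (PySem.List.pyRange ((q : Int) + 1) ((s.length : Int) + 1)).filter
      (fun i => PySem.List.slice s (some i) (some (i + (e.length : Int))) == e) := by
  rw [PySem.List.pyRange_one_append (k : Int) (q : Int) ((s.length : Int) + 1) (by omega) (by omega),
    List.filter_append]
  have h1 : (PySem.List.pyRange (k : Int) (q : Int)).filter
      (fun i => PySem.List.slice s (some i) (some (i + (e.length : Int))) == e) = [] := by
    apply List.filter_eq_nil_iff.mpr
    intro i hi
    have hm := PySem.List.mem_pyRange_one.mp hi
    have hj : i = ((i.toNat : Nat) : Int) := by omega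
    rw [hj, pvPredSlice]
    simp only [decide_eq_true_eq]
    exact hmin i.toNat (by omega) (by omega)
  have h2 : (PySem.List.slice s (some ((q : Nat) : Int)) (some (((q : Nat) : Int) + (e.length : Int))) == e) = true := by
    rw [pvPredSlice]; simpa using hpre
  rw [h1, List.nil_append,
    PySem.List.pyRange_one_cons (by omega : (q : Int) < (s.length : Int) + 1),
    List.filter_cons, if_pos h2]

-- the boundary test of both ports, named for the proofs below
def pvBd (t : List Char) (m : Int) (i : Int) : Bool :=
  ((i == 0) || !(PySem.Chars.isalnum (PySem.List.pyGetD t (i - 1) ' '))) &&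
  ((i + m == (t.length : Int)) || !(PySem.Chars.isalnum (PySem.List.pyGetD t (i + m) ' ')))

-- start past the end: Python's find(sub, start) is -1
lemma pvFindFromPast (s e : List Char) (st : Int) (h : (s.length : Int) < st) :
    PySem.Chars.findFrom s e st = -1 := by
  simp only [PySem.Chars.findFrom]
  rw [if_neg (by omega : ¬ st < 0), if_pos h]

-- A's while loop over the iterated case-sensitive finds = the filtered position range
lemma pvTail (t e : List Char) (lbl : String) :
    ∀ (d k fuel : Nat) (acc : List (Int × Int × String)), k ≤ t.length → t.length - k ≤ d → d < fuel →
    pvAWhile t e lbl fuel (PySem.Chars.findFrom t e ((k : Int) + 1)) acc =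
      acc ++ ((((PySem.List.pyRange ((k : Int) + 1) ((t.length : Int) + 1)).filter
          (fun i => PySem.List.slice t (some i) (some (i + (e.length : Int))) == e)).filter
            (pvBd t (e.length : Int))).map (fun i => (i, i + (e.length : Int), lbl))) := by
  intro d
  induction d with
  | zero =>
    intro k fuel acc hk hd hf
    have hke : k = t.length := by omega
    subst hke
    rw [pvFindFromPast t e _ (by omega)]
    obtain ⟨fuel, rfl⟩ : ∃ f, fuel = f + 1 := ⟨fuel - 1, by omega⟩
    rw [PySem.List.pyRange_one_eq_nil (by omega)]
    simp [pvAWhile]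
  | succ d ih =>
    intro k fuel acc hk hd hf
    by_cases hke : k = t.length
    · subst hke
      rw [pvFindFromPast t e _ (by omega)]
      obtain ⟨fuel, rfl⟩ : ∃ f, fuel = f + 1 := ⟨fuel - 1, by omega⟩
      rw [PySem.List.pyRange_one_eq_nil (by omega)]
      simp [pvAWhile]
    · have hklt : k < t.length := by omega
      have hcast : (k : Int) + 1 = ((k + 1 : Nat) : Int) := by push_cast; ring
      rw [hcast, PySem.Chars.findFrom_natCast t e (k + 1) (by omega)]
      by_cases hneg : PySem.Chars.find (t.drop (k + 1)) e = -1
      · rw [if_pos hneg]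
        obtain ⟨fuel, rfl⟩ : ∃ f, fuel = f + 1 := ⟨fuel - 1, by omega⟩
        rw [pvFilterNil t e (k + 1) ((PySem.Chars.find_eq_neg_one_iff _ _).mp hneg)]
        simp [pvAWhile]
      · rw [if_neg hneg]
        have h0 : 0 ≤ PySem.Chars.find (t.drop (k + 1)) e := by
          have := PySem.Chars.neg_one_le_find (t.drop (k + 1)) e; omega
        obtain ⟨hpre', hmin'⟩ := PySem.Chars.find_spec (s := t.drop (k + 1)) (sub := e) h0
        have hle : PySem.Chars.find (t.drop (k + 1)) e ≤ ((t.drop (k + 1)).length : Int) :=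
          PySem.Chars.find_le_length _ _
        have hlen : (t.drop (k + 1)).length = t.length - (k + 1) := by simp
        set q' : Nat := (PySem.Chars.find (t.drop (k + 1)) e).toNat with hq'
        have hqv : PySem.Chars.find (t.drop (k + 1)) e = (q' : Int) := by omega
        have hqn : k + 1 + q' ≤ t.length := by omega
        have hpre : e <+: t.drop (k + 1 + q') := by
          rw [← List.drop_drop]
          exact hpre'
        have hmin : ∀ j, k + 1 ≤ j → j < k + 1 + q' → ¬ e <+: t.drop j := by
          intro j hj1 hj2 hp
          apply hmin' (j - (k + 1)) (by omega)
          rw [List.drop_drop, show k + 1 + (j - (k + 1)) = j by omega]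
          exact hp
        rw [show ((k + 1 : Nat) : Int) + PySem.Chars.find (t.drop (k + 1)) e
              = ((k + 1 + q' : Nat) : Int) by rw [hqv]; push_cast; ring]
        obtain ⟨fuel, rfl⟩ : ∃ f, fuel = f + 1 := ⟨fuel - 1, by omega⟩
        rw [pvFilterCons t e (k + 1) (k + 1 + q') (by omega) hqn hpre hmin]
        show pvAWhile t e lbl fuel
            (PySem.Chars.findFrom t e (((k + 1 + q' : Nat) : Int) + 1))
            (if pvBd t (e.length : Int) ((k + 1 + q' : Nat) : Int) = true then
              acc ++ [(((k + 1 + q' : Nat) : Int), ((k + 1 + q' : Nat) : Int) + (e.length : Int), lbl)]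
             else acc) = _
        rw [show ((k + 1 + q' : Nat) : Int) + 1 = ((k + 1 + q' : Nat) : Int) + 1 from rfl]
        rw [ih (k + 1 + q') fuel _ (by omega) (by omega) (by omega)]
        by_cases hbd : pvBd t (e.length : Int) ((k + 1 + q' : Nat) : Int) = true
        · push_cast at hbd ⊢
          simp [hbd]
        · push_cast at hbd ⊢
          simp [hbd]

-- A's per-entity step in closed form: first case-insensitive hit, then the case-sensitive tail
lemma pvStep (t : List Char) (el : String × String) (out : List (Int × Int × String)) :
    pvAWhile t el.1.toList el.2 (t.length + 2)
      (PySem.Chars.find (PySem.Chars.lower t) (PySem.Chars.lower el.1.toList)) out =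
    (match (PySem.List.pyRange 0 ((t.length : Int) + 1)).find?
        (fun i => PySem.List.slice (PySem.Chars.lower t) (some i)
          (some (i + (el.1.toList.length : Int))) == PySem.Chars.lower el.1.toList) with
     | none => out
     | some p =>
       (p :: (PySem.List.pyRange (p + 1) ((t.length : Int) + 1)).filter
          (fun i => PySem.List.slice t (some i) (some (i + (el.1.toList.length : Int))) == el.1.toList)).foldl
         (fun out i =>
           if ((i == 0) || !(PySem.Chars.isalnum (PySem.List.pyGetD t (i - 1) ' '))) &&
              ((i + (el.1.toList.length : Int) == (t.length : Int)) ||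
               !(PySem.Chars.isalnum (PySem.List.pyGetD t (i + (el.1.toList.length : Int)) ' '))) then
             out ++ [(i, i + (el.1.toList.length : Int), el.2)] else out) out) := by
  set e : List Char := el.1.toList with he
  have hlowlen : (PySem.Chars.lower t).length = t.length := by simp [PySem.Chars.lower]
  have helolen : (PySem.Chars.lower e).length = e.length := by simp [PySem.Chars.lower]
  have h0 : -1 ≤ PySem.Chars.find (PySem.Chars.lower t) (PySem.Chars.lower e) :=
    PySem.Chars.neg_one_le_find _ _
  by_cases hneg : PySem.Chars.find (PySem.Chars.lower t) (PySem.Chars.lower e) = -1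
  · have hci : (PySem.List.pyRange 0 ((t.length : Int) + 1)).filter
        (fun i => PySem.List.slice (PySem.Chars.lower t) (some i)
          (some (i + (e.length : Int))) == PySem.Chars.lower e) = [] := by
      have := pvFilterNil (PySem.Chars.lower t) (PySem.Chars.lower e) 0
        (by rw [List.drop_zero]; exact (PySem.Chars.find_eq_neg_one_iff _ _).mp hneg)
      simpa only [hlowlen, helolen, Nat.cast_zero] using this
    have hfd : (PySem.List.pyRange 0 ((t.length : Int) + 1)).find?
        (fun i => PySem.List.slice (PySem.Chars.lower t) (some i)
          (some (i + (e.length : Int))) == PySem.Chars.lower e) = none := by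
      rw [← List.head?_filter, hci]; rfl
    rw [hfd, hneg]
    obtain ⟨f, hf⟩ : ∃ f, t.length + 2 = f + 1 := ⟨t.length + 1, by omega⟩
    rw [hf]
    simp [pvAWhile]
  · have hpos : 0 ≤ PySem.Chars.find (PySem.Chars.lower t) (PySem.Chars.lower e) := by omega
    obtain ⟨hpre', hmin'⟩ := PySem.Chars.find_spec (s := PySem.Chars.lower t)
      (sub := PySem.Chars.lower e) hpos
    have hle := PySem.Chars.find_le_length (PySem.Chars.lower t) (PySem.Chars.lower e)
    set f0 : Nat := (PySem.Chars.find (PySem.Chars.lower t) (PySem.Chars.lower e)).toNat with hf0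
    have hfv : PySem.Chars.find (PySem.Chars.lower t) (PySem.Chars.lower e) = (f0 : Int) := by omega
    have hf0le : f0 ≤ t.length := by rw [hlowlen] at hle; omega
    have hci : (PySem.List.pyRange 0 ((t.length : Int) + 1)).filter
        (fun i => PySem.List.slice (PySem.Chars.lower t) (some i)
          (some (i + (e.length : Int))) == PySem.Chars.lower e) =
        (f0 : Int) :: (PySem.List.pyRange ((f0 : Int) + 1) ((t.length : Int) + 1)).filter
          (fun i => PySem.List.slice (PySem.Chars.lower t) (some i)
            (some (i + (e.length : Int))) == PySem.Chars.lower e) := by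
      have := pvFilterCons (PySem.Chars.lower t) (PySem.Chars.lower e) 0 f0 (by omega)
        (by omega) hpre' (fun j _ hj => hmin' j hj)
      simpa only [hlowlen, helolen, Nat.cast_zero] using this
    have hfd : (PySem.List.pyRange 0 ((t.length : Int) + 1)).find?
        (fun i => PySem.List.slice (PySem.Chars.lower t) (some i)
          (some (i + (e.length : Int))) == PySem.Chars.lower e) = some ((f0 : Nat) : Int) := by
      rw [← List.head?_filter, hci]; rfl
    rw [hfd, hfv]
    split
    next h => exact absurd h (by simp)
    next p h =>
    have hp : p = ((f0 : Nat) : Int) := by injection h with h1; exact h1.symm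
    subst hp
    rw [PySem.List.foldl_append_if
      (fun i => ((i == 0) || !(PySem.Chars.isalnum (PySem.List.pyGetD t (i - 1) ' '))) &&
        ((i + (e.length : Int) == (t.length : Int)) ||
         !(PySem.Chars.isalnum (PySem.List.pyGetD t (i + (e.length : Int)) ' '))))
      (fun i => (i, i + (e.length : Int), el.2))]
    show pvAWhile t e el.2 (t.length + 1 + 1) ((f0 : Int)) out = _
    rw [pvAWhile]
    rw [if_neg (by omega : ¬ ((f0 : Int)) = -1)]
    show pvAWhile t e el.2 (t.length + 1)
        (PySem.Chars.findFrom t e ((f0 : Int) + 1))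
        (if pvBd t (e.length : Int) (f0 : Int) = true then
          out ++ [((f0 : Int), (f0 : Int) + (e.length : Int), el.2)] else out) = _
    rw [pvTail t e el.2 (t.length - f0) f0 (t.length + 1) _ hf0le (by omega) (by omega)]
    by_cases hbd : pvBd t (e.length : Int) (f0 : Int) = true
    · have hbd' := hbd
      simp only [pvBd] at hbd'
      simp [pvBd, hbd']
    · have hbd' := hbd
      simp only [pvBd] at hbd'
      simp [pvBd, hbd']

-- ---- B-side: characterising the hits dict ----

-- the inner condition of B's position-major pass, with the targets test folded in
def pvCond (t : List Char) (targets : PySem.Set (List Char)) (i m : Int) : Bool :=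
  decide (i + m ≤ (t.length : Int)) &&
  ((i + m == (t.length : Int)) || !(PySem.Chars.isalnum (PySem.List.pyGetD t (i + m) ' '))) &&
  targets.contains (PySem.List.slice (PySem.Chars.lower t) (some i) (some (i + m)))

-- the candidate (key, position) pairs contributed by one position i
def pvCf (t : List Char) (lengths : List Int) (targets : PySem.Set (List Char)) (i : Int) : List (List Char × Int) :=
  if (0 < i) && PySem.Chars.isalnum (PySem.List.pyGetD t (i - 1) ' ') then []
  else (lengths.filter (pvCond t targets i)).map
    (fun m => (PySem.List.slice (PySem.Chars.lower t) (some i) (some (i + m)), i))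

-- the positions B keeps for a lowered entity k: boundary-valid case-insensitive matches
def pvQ (t : List Char) (k : List Char) (i : Int) : Bool :=
  decide (i + (k.length : Int) ≤ (t.length : Int)) && pvBd t (k.length : Int) i &&
  (PySem.List.slice (PySem.Chars.lower t) (some i) (some (i + (k.length : Int))) == k)

-- B's inner lengths-loop at one position = a fold of modify over that position's candidates
lemma pvInner (t : List Char) (targets : PySem.Set (List Char)) (i : Int) :
    ∀ (ls : List Int) (d : PySem.Dict (List Char) (List Int)),
    ls.foldl (fun d m =>
      if decide (i + m ≤ (t.length : Int)) &&
         ((i + m == (t.length : Int)) || !(PySem.Chars.isalnum (PySem.List.pyGetD t (i + m) ' '))) then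
        if targets.contains (PySem.List.slice (PySem.Chars.lower t) (some i) (some (i + m))) then
          d.modify (PySem.List.slice (PySem.Chars.lower t) (some i) (some (i + m))) [] (· ++ [i])
        else d
      else d) d
    = ((ls.filter (pvCond t targets i)).map
        (fun m => (PySem.List.slice (PySem.Chars.lower t) (some i) (some (i + m)), i))).foldl
        (fun d p => d.modify p.1 [] (· ++ [p.2])) d := by
  intro ls
  induction ls with
  | nil => intro d; rfl
  | cons m ms ih =>
    intro d
    rw [List.foldl_cons, List.filter_cons]
    rcases h1 : (decide (i + m ≤ (t.length : Int)) &&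
        ((i + m == (t.length : Int)) || !(PySem.Chars.isalnum (PySem.List.pyGetD t (i + m) ' ')))) with _ | _
    · have hc : pvCond t targets i m = false := by
        simp only [pvCond, h1, Bool.false_and]
      rw [if_neg (by simp [h1]), if_neg (by simp [hc]), ih]
    · rcases h2 : targets.contains (PySem.List.slice (PySem.Chars.lower t) (some i) (some (i + m))) with _ | _
      · have hc : pvCond t targets i m = false := by
          simp only [pvCond, h1, h2, Bool.true_and, Bool.and_false]
        rw [if_pos (by simp [h1]), if_neg (by simp [h2]), if_neg (by simp [hc]), ih]
      · have hc : pvCond t targets i m = true := by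
          simp only [pvCond, h1, h2, Bool.true_and, Bool.and_true]
        rw [if_pos (by simp [h1]), if_pos (by simp [h2]), if_pos hc, List.map_cons, List.foldl_cons, ih]

-- B's whole nested pass = one fold of modify over the flattened candidate list
lemma pvFlatten (t : List Char) (lengths : List Int) (targets : PySem.Set (List Char)) :
    ∀ (xs : List Int) (d : PySem.Dict (List Char) (List Int)),
    xs.foldl (fun d i =>
      if (0 < i) && PySem.Chars.isalnum (PySem.List.pyGetD t (i - 1) ' ') then d
      else lengths.foldl (fun d m =>
        if decide (i + m ≤ (t.length : Int)) &&
           ((i + m == (t.length : Int)) || !(PySem.Chars.isalnum (PySem.List.pyGetD t (i + m) ' '))) then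
          if targets.contains (PySem.List.slice (PySem.Chars.lower t) (some i) (some (i + m))) then
            d.modify (PySem.List.slice (PySem.Chars.lower t) (some i) (some (i + m))) [] (· ++ [i])
          else d
        else d) d) d
    = (xs.flatMap (pvCf t lengths targets)).foldl (fun d p => d.modify p.1 [] (· ++ [p.2])) d := by
  intro xs
  induction xs with
  | nil => intro d; rfl
  | cons i is ih =>
    intro d
    rw [List.foldl_cons, List.flatMap_cons, List.foldl_append, pvCf]
    by_cases hl : ((0 < i) && PySem.Chars.isalnum (PySem.List.pyGetD t (i - 1) ' ')) = true
    · rw [if_pos hl, if_pos hl, ih]; rfl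
    · rw [if_neg hl, if_neg hl, pvInner t targets i, ih]

-- only one element of a Nodup list can pass the filter
lemma pvSingleFilter {α : Type} (l : List α) (p : α → Bool) (a : α)
    (hn : l.Nodup) (ha : a ∈ l) (h : ∀ x ∈ l, p x = true → x = a) :
    l.filter p = if p a then [a] else [] := by
  induction l with
  | nil => cases ha
  | cons x xs ih =>
    rw [List.filter_cons]
    rcases List.mem_cons.mp ha with heq | hxs
    · subst heq
      have hnil : xs.filter p = [] := by
        apply List.filter_eq_nil_iff.mpr
        intro y hy hp
        exact (List.nodup_cons.mp hn).1 ((h y (by simp [hy]) hp) ▸ hy)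
      by_cases hp : p a = true
      · rw [if_pos hp, if_pos hp, hnil]
      · rw [if_neg hp, if_neg (by simpa using hp), hnil]
    · have hpx : ¬ p x = true := by
        intro hp
        exact (List.nodup_cons.mp hn).1 ((h x (by simp) hp) ▸ hxs)
      rw [if_neg hpx]
      exact ih (List.nodup_cons.mp hn).2 hxs (fun y hy hp => h y (by simp [hy]) hp)

lemma pvFlatIf {α : Type} (l : List α) (q : α → Bool) (f : α → List α)
    (hf : ∀ x ∈ l, f x = if q x then [x] else []) :
    l.flatMap f = l.filter q := by
  induction l with
  | nil => rfl
  | cons x xs ih =>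
    rw [List.flatMap_cons, List.filter_cons, hf x (by simp),
      ih (fun y hy => hf y (by simp [hy]))]
    by_cases hq : q x = true
    · rw [if_pos hq, if_pos hq]; rfl
    · rw [if_neg hq, if_neg hq]; rfl

-- one position's candidates, filtered to the key k, collapse to the pvQ test
lemma pvCfAtKey (t : List Char) (lengths : List Int) (targets : PySem.Set (List Char))
    (hnodup : lengths.Nodup) (hpos : ∀ x ∈ lengths, 0 ≤ x)
    (k : List Char) (hk : k ∈ targets) (hm : (k.length : Int) ∈ lengths)
    (i : Int) (h0 : 0 ≤ i) (hin : i ≤ (t.length : Int)) :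
    ((pvCf t lengths targets i).filter (fun p => p.1 == k)).map Prod.snd =
      if pvQ t k i then [i] else [] := by
  have hlowlen : (PySem.Chars.lower t).length = t.length := by simp [PySem.Chars.lower]
  have hclamp : ∀ (j : Int), 0 ≤ j → j ≤ (t.length : Int) →
      PySem.List.clampIdx (PySem.Chars.lower t).length j = j.toNat := by
    intro j hj0 hjn
    have hj : j = ((j.toNat : Nat) : Int) := by omega
    rw [hj, PySem.List.clampIdx_natCast, hlowlen]
    omega
  rw [pvCf]
  by_cases hl : ((0 < i) && PySem.Chars.isalnum (PySem.List.pyGetD t (i - 1) ' ')) = true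
  · -- start inside a word: no candidates, and pvQ fails its left-boundary test
    have hl' := hl
    rw [Bool.and_eq_true] at hl'
    obtain ⟨hl1, hl2⟩ := hl' 
    have hq : pvQ t k i = false := by
      have hd : 0 < i := by simpa using hl1
      simp only [pvQ, pvBd]
      have h1 : (i == 0) = false := by simp; omega
      rw [h1, hl2]
      simp
    rw [if_pos hl, hq]
    rfl
  · rw [if_neg hl]
    -- collapse the per-length filter to the single admissible length k.length
    rw [List.filter_map, List.map_map, List.filter_filter]
    have hsingle := pvSingleFilter lengths
      (fun m => ((fun p => p.1 == k) ∘ (fun m => (PySem.List.slice (PySem.Chars.lower t) (some i) (some (i + m)), i))) m && pvCond t targets i m)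
      ((k.length : Int)) hnodup hm ?side
    case side =>
      intro m hmem hp
      rw [Bool.and_eq_true] at hp
      obtain ⟨hslice, hcond⟩ := hp
      have hsl : PySem.List.slice (PySem.Chars.lower t) (some i) (some (i + m)) = k := by
        simpa using hslice
      have hle : i + m ≤ (t.length : Int) := by
        simp only [pvCond] at hcond
        rw [Bool.and_eq_true, Bool.and_eq_true] at hcond
        simpa using hcond.1.1
      have hm0 : 0 ≤ m := hpos m hmem
      have hlen : (PySem.List.slice (PySem.Chars.lower t) (some i) (some (i + m))).length = k.length := by
        rw [hsl]
      rw [PySem.List.length_slice, hclamp (i + m) (by omega) hle, hclamp i h0 hin] at hlen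
      omega
    rw [hsingle]
    simp only [Function.comp_apply]
    -- the surviving if-condition is exactly pvQ
    have hiff : ((PySem.List.slice (PySem.Chars.lower t) (some i) (some (i + (k.length : Int))) == k)
          && pvCond t targets i (k.length : Int)) = pvQ t k i := by
      rw [Bool.eq_iff_iff]
      simp only [Bool.and_eq_true, pvCond, pvQ, pvBd]
      constructor
      · rintro ⟨hsl, ⟨hle, hrt⟩, _⟩
        refine ⟨⟨hle, ?_, hrt⟩, hsl⟩
        rcases Int.lt_or_le 0 i with hpos' | hz
        · have : ¬ PySem.Chars.isalnum (PySem.List.pyGetD t (i - 1) ' ') = true := by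
            intro hal
            exact hl (by simp [hal]; omega)
          simp [this]
        · have hz' : i = 0 := by omega
          simp [hz']
      · rintro ⟨⟨hle, _, hrt⟩, hsl⟩
        refine ⟨hsl, ⟨hle, hrt⟩, ?_⟩
        have hslk : PySem.List.slice (PySem.Chars.lower t) (some i) (some (i + (k.length : Int))) = k := by
          simpa using hsl
        rw [hslk]
        exact (PySem.Set.contains_iff _ _).mpr hk
    simp only [hiff]
    by_cases hq : pvQ t k i = true
    · rw [if_pos hq, if_pos hq]
      rfl
    · rw [if_neg hq, if_neg hq]
      rfl

-- the hits dict at a lowered entity key = the pvQ-filtered position range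
lemma pvHitsGetD (t : List Char) (lengths : List Int) (targets : PySem.Set (List Char))
    (hnodup : lengths.Nodup) (hpos : ∀ x ∈ lengths, 0 ≤ x)
    (k : List Char) (hk : k ∈ targets) (hm : (k.length : Int) ∈ lengths) :
    ((((PySem.List.pyRange 0 ((t.length : Int) + 1)).flatMap (pvCf t lengths targets)).foldl
        (fun d p => d.modify p.1 [] (· ++ [p.2])) PySem.Dict.empty).getD k []) =
      (PySem.List.pyRange 0 ((t.length : Int) + 1)).filter (pvQ t k) := by
  rw [PySem.Dict.getD_foldl_modify_append]
  have hemp : (PySem.Dict.empty (κ := List Char) (ν := List Int)).getD k [] = [] := rfl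
  rw [hemp, List.nil_append, List.filter_flatMap, List.map_flatMap]
  apply pvFlatIf
  intro i hi
  have hm' := PySem.List.mem_pyRange_one.mp hi
  exact pvCfAtKey t lengths targets hnodup hpos k hk hm i (by omega) (by omega)

-- ---- the bridge: outside D_, A's mixed-case scan keeps exactly the pvQ positions ----

lemma pvSegEq (t el : List Char) (lbl : String) (out : List (Int × Int × String))
    (hbad : pvBadHit t el = false) :
    (match (PySem.List.pyRange 0 ((t.length : Int) + 1)).find?
        (fun i => PySem.List.slice (PySem.Chars.lower t) (some i)
          (some (i + (el.length : Int))) == PySem.Chars.lower el) with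
     | none => out
     | some p =>
       (p :: (PySem.List.pyRange (p + 1) ((t.length : Int) + 1)).filter
          (fun i => PySem.List.slice t (some i) (some (i + (el.length : Int))) == el)).foldl
         (fun out i =>
           if ((i == 0) || !(PySem.Chars.isalnum (PySem.List.pyGetD t (i - 1) ' '))) &&
              ((i + (el.length : Int) == (t.length : Int)) ||
               !(PySem.Chars.isalnum (PySem.List.pyGetD t (i + (el.length : Int)) ' '))) then
             out ++ [(i, i + (el.length : Int), lbl)] else out) out)
    = out ++ ((PySem.List.pyRange 0 ((t.length : Int) + 1)).filter (pvQ t (PySem.Chars.lower el))).map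
        (fun i => (i, i + (el.length : Int), lbl)) := by
  have hlowlen : (PySem.Chars.lower t).length = t.length := by simp [PySem.Chars.lower]
  have hklen : (PySem.Chars.lower el).length = el.length := by simp [PySem.Chars.lower]
  have hlmap : ∀ (l : List Char), PySem.Chars.lower l = l.map PySem.Chars.lowerChar := fun _ => rfl
  -- outside D_, a boundary-valid case-insensitive occurrence after the first one is exact
  have hno : ∀ i : Nat, i ≤ t.length →
      (PySem.Chars.lower el) <+: (PySem.Chars.lower t).drop i →
      PySem.Chars.find (PySem.Chars.lower t) (PySem.Chars.lower el) < ((i : Nat) : Int) →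
      pvBd t (el.length : Int) ((i : Nat) : Int) = true →
      el <+: t.drop i := by
    intro i hi hci hfind hbd
    have him : i + el.length ≤ t.length := by
      have := hci.length_le
      rw [List.length_drop, hklen, hlowlen] at this
      omega
    by_contra hex
    simp only [pvBadHit, List.any_eq_false] at hbad
    apply hbad i (by rw [List.mem_range]; omega)
    rw [decide_eq_true_eq]
    refine ⟨hfind, hci, hex, ?_, ?_⟩
    · rcases Nat.eq_zero_or_pos i with rfl | hp
      · rw [List.getD_cons_zero]; decide
      · have hbd' := hbd
        rw [pvBd, Bool.and_eq_true] at hbd'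
        have h1 := hbd'.1
        rw [Bool.or_eq_true] at h1
        rcases h1 with h | h
        · simp only [beq_iff_eq] at h
          omega
        · rw [show i = (i - 1) + 1 by omega, List.getD_cons_succ]
          rw [show ((i : Int) - 1) = ((i - 1 : Nat) : Int) by omega,
            PySem.List.pyGetD_natCast] at h
          simpa using h
    · have hbd' := hbd
      rw [pvBd, Bool.and_eq_true] at hbd'
      have h1 := hbd'.2
      rw [Bool.or_eq_true] at h1
      rcases h1 with h | h
      · simp only [beq_iff_eq] at h
        have hlen : i + el.length = t.length := by omega
        rw [List.getD_eq_default _ _ (by omega)]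
        decide
      · rw [show ((i : Int) + (el.length : Int)) = ((i + el.length : Nat) : Int) by push_cast; ring,
          PySem.List.pyGetD_natCast] at h
        simpa using h
  -- exact occurrences are case-insensitive ones
  have hexci : ∀ i : Nat, el <+: t.drop i → (PySem.Chars.lower el) <+: (PySem.Chars.lower t).drop i := by
    intro i h
    rw [hlmap, hlmap, ← List.map_drop]
    exact List.IsPrefix.map _ h
  by_cases hneg : PySem.Chars.find (PySem.Chars.lower t) (PySem.Chars.lower el) = -1
  · -- the entity does not occur at all: both sides add nothing
    have hci : (PySem.List.pyRange 0 ((t.length : Int) + 1)).filter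
        (fun i => PySem.List.slice (PySem.Chars.lower t) (some i)
          (some (i + (el.length : Int))) == PySem.Chars.lower el) = [] := by
      have := pvFilterNil (PySem.Chars.lower t) (PySem.Chars.lower el) 0
        (by rw [List.drop_zero]; exact (PySem.Chars.find_eq_neg_one_iff _ _).mp hneg)
      simpa only [hlowlen, hklen, Nat.cast_zero] using this
    have hfd : (PySem.List.pyRange 0 ((t.length : Int) + 1)).find?
        (fun i => PySem.List.slice (PySem.Chars.lower t) (some i)
          (some (i + (el.length : Int))) == PySem.Chars.lower el) = none := by
      rw [← List.head?_filter, hci]; rfl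
    rw [hfd]
    dsimp only
    have hqnil : (PySem.List.pyRange 0 ((t.length : Int) + 1)).filter (pvQ t (PySem.Chars.lower el)) = [] := by
      apply List.filter_eq_nil_iff.mpr
      intro i hi hq
      have hnotci := List.filter_eq_nil_iff.mp hci i hi
      apply hnotci
      simp only [pvQ, Bool.and_eq_true] at hq
      have := hq.2
      rw [show (((PySem.Chars.lower el).length : Nat) : Int) = ((el.length : Nat) : Int) by rw [hklen]] at this
      exact this
    rw [hqnil]
    simp
  · -- first case-insensitive hit f0; then compare tails pointwise
    have hpos : 0 ≤ PySem.Chars.find (PySem.Chars.lower t) (PySem.Chars.lower el) := by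
      have := PySem.Chars.neg_one_le_find (PySem.Chars.lower t) (PySem.Chars.lower el); omega
    obtain ⟨hpre', hmin'⟩ := PySem.Chars.find_spec (s := PySem.Chars.lower t)
      (sub := PySem.Chars.lower el) hpos
    have hle := PySem.Chars.find_le_length (PySem.Chars.lower t) (PySem.Chars.lower el)
    set f0 : Nat := (PySem.Chars.find (PySem.Chars.lower t) (PySem.Chars.lower el)).toNat with hf0
    have hfv : PySem.Chars.find (PySem.Chars.lower t) (PySem.Chars.lower el) = (f0 : Int) := by omega
    have hf0le : f0 ≤ t.length := by rw [hlowlen] at hle; omega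
    have hf0m : f0 + el.length ≤ t.length := by
      have h1 := hpre'.length_le
      rw [List.length_drop, hklen, hlowlen] at h1
      omega
    have hci : (PySem.List.pyRange 0 ((t.length : Int) + 1)).filter
        (fun i => PySem.List.slice (PySem.Chars.lower t) (some i)
          (some (i + (el.length : Int))) == PySem.Chars.lower el) =
        (f0 : Int) :: (PySem.List.pyRange ((f0 : Int) + 1) ((t.length : Int) + 1)).filter
          (fun i => PySem.List.slice (PySem.Chars.lower t) (some i)
            (some (i + (el.length : Int))) == PySem.Chars.lower el) := by
      have := pvFilterCons (PySem.Chars.lower t) (PySem.Chars.lower el) 0 f0 (by omega)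
        (by omega) hpre' (fun j _ hj => hmin' j hj)
      simpa only [hlowlen, hklen, Nat.cast_zero] using this
    have hfd : (PySem.List.pyRange 0 ((t.length : Int) + 1)).find?
        (fun i => PySem.List.slice (PySem.Chars.lower t) (some i)
          (some (i + (el.length : Int))) == PySem.Chars.lower el) = some ((f0 : Nat) : Int) := by
      rw [← List.head?_filter, hci]; rfl
    rw [hfd]
    dsimp only
    rw [PySem.List.foldl_append_if
      (fun i => ((i == 0) || !(PySem.Chars.isalnum (PySem.List.pyGetD t (i - 1) ' '))) &&
        ((i + (el.length : Int) == (t.length : Int)) ||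
         !(PySem.Chars.isalnum (PySem.List.pyGetD t (i + (el.length : Int)) ' '))))
      (fun i => (i, i + (el.length : Int), lbl))]
    congr 1
    congr 1
    -- the kept positions coincide
    rw [List.filter_cons]
    rw [PySem.List.pyRange_one_append 0 (f0 : Int) ((t.length : Int) + 1)
        (by omega) (by omega), List.filter_append]
    have hfront : (PySem.List.pyRange 0 (f0 : Int)).filter (pvQ t (PySem.Chars.lower el)) = [] := by
      apply List.filter_eq_nil_iff.mpr
      intro i hi hq
      have hmr := PySem.List.mem_pyRange_one.mp hi
      simp only [pvQ, Bool.and_eq_true] at hq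
      have hcis := hq.2
      have hiN : i = ((i.toNat : Nat) : Int) := by omega
      rw [hiN, pvPredSlice, decide_eq_true_eq] at hcis
      exact hmin' i.toNat (by omega) hcis
    rw [hfront, List.nil_append,
      PySem.List.pyRange_one_cons (by omega : (f0 : Int) < (t.length : Int) + 1),
      List.filter_cons]
    have hqf0 : pvQ t (PySem.Chars.lower el) ((f0 : Nat) : Int) =
        (((((f0 : Nat) : Int) == 0) || !(PySem.Chars.isalnum (PySem.List.pyGetD t (((f0 : Nat) : Int) - 1) ' '))) &&
         ((((f0 : Nat) : Int) + (el.length : Int) == (t.length : Int)) ||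
          !(PySem.Chars.isalnum (PySem.List.pyGetD t (((f0 : Nat) : Int) + (el.length : Int)) ' ')))) := by
      rw [Bool.eq_iff_iff]
      simp only [pvQ, pvBd, Bool.and_eq_true]
      constructor
      · rintro ⟨⟨_, hb⟩, _⟩
        rw [show (((PySem.Chars.lower el).length : Nat) : Int) = ((el.length : Nat) : Int) by rw [hklen]] at hb
        exact hb
      · intro hb
        rw [show (((PySem.Chars.lower el).length : Nat) : Int) = ((el.length : Nat) : Int) by rw [hklen]]
        refine ⟨⟨by simp; omega, hb⟩, ?_⟩
        rw [show ((el.length : Nat) : Int) = (((PySem.Chars.lower el).length : Nat) : Int) by rw [hklen],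
          pvPredSlice, decide_eq_true_eq]
        exact hpre'
    rw [hqf0]
    -- the tails coincide pointwise
    have htail : (PySem.List.pyRange ((f0 : Int) + 1) ((t.length : Int) + 1)).filter (pvQ t (PySem.Chars.lower el)) =
        ((PySem.List.pyRange ((f0 : Int) + 1) ((t.length : Int) + 1)).filter
          (fun i => PySem.List.slice t (some i) (some (i + (el.length : Int))) == el)).filter
          (fun i => ((i == 0) || !(PySem.Chars.isalnum (PySem.List.pyGetD t (i - 1) ' '))) &&
            ((i + (el.length : Int) == (t.length : Int)) ||
             !(PySem.Chars.isalnum (PySem.List.pyGetD t (i + (el.length : Int)) ' ')))) := by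
      rw [List.filter_filter]
      apply List.filter_congr
      intro i hi
      have hmr := PySem.List.mem_pyRange_one.mp hi
      obtain ⟨iN, rfl⟩ : ∃ iN : Nat, i = ((iN : Nat) : Int) := ⟨i.toNat, by omega⟩
      rw [Bool.eq_iff_iff]
      simp only [pvQ, Bool.and_eq_true]
      constructor
      · rintro ⟨⟨hdec, hbd⟩, hcis⟩
        rw [pvPredSlice, decide_eq_true_eq] at hcis
        rw [show (((PySem.Chars.lower el).length : Nat) : Int) = ((el.length : Nat) : Int) by rw [hklen]] at hdec hbd
        have hex := hno iN (by omega) hcis (by rw [hfv]; push_cast; omega) hbd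
        exact ⟨by simpa only [pvBd, Bool.and_eq_true] using hbd,
          by rw [pvPredSlice, decide_eq_true_eq]; exact hex⟩
      · rintro ⟨hbd, hexs⟩
        rw [pvPredSlice, decide_eq_true_eq] at hexs
        have hlen : iN + el.length ≤ t.length := by
          have := hexs.length_le
          rw [List.length_drop] at this
          omega
        refine ⟨⟨?_, ?_⟩, ?_⟩
        · rw [show (((PySem.Chars.lower el).length : Nat) : Int) = ((el.length : Nat) : Int) by rw [hklen],
            decide_eq_true_eq]
          push_cast
          omega
        · rw [show (((PySem.Chars.lower el).length : Nat) : Int) = ((el.length : Nat) : Int) by rw [hklen]]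
          simp only [pvBd, Bool.and_eq_true]
          exact hbd
        · rw [pvPredSlice, decide_eq_true_eq]
          exact hexci iN hexs
    rw [htail]

-- a fold whose step appends a fixed per-element segment is the flatMap of the segments
lemma pvTop {α : Type} (step : List (Int × Int × String) → α → List (Int × Int × String))
    (seg : α → List (Int × Int × String)) :
    ∀ (ps : List α) (acc : List (Int × Int × String)),
    (∀ el ∈ ps, ∀ out, step out el = out ++ seg el) →
    ps.foldl step acc = acc ++ ps.flatMap seg := by
  intro ps
  induction ps with
  | nil => intro acc _; simp
  | cons x xs ih =>
    intro acc h
    rw [List.foldl_cons, List.flatMap_cons, h x (by simp), ih _ (fun el hel => h el (by simp [hel])),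
      List.append_assoc]

-- ---- tightness: inside D_ the two outputs really differ (B's list is strictly longer) ----

-- the positions A keeps for one entity (first case-insensitive hit, case-sensitive tail,
-- boundary-filtered); A's per-entity step appends exactly their spans
def pvASeg (t e : List Char) : List Int :=
  match (PySem.List.pyRange 0 ((t.length : Int) + 1)).find?
      (fun i => PySem.List.slice (PySem.Chars.lower t) (some i)
        (some (i + (e.length : Int))) == PySem.Chars.lower e) with
  | none => []
  | some p =>
    (p :: (PySem.List.pyRange (p + 1) ((t.length : Int) + 1)).filter
        (fun i => PySem.List.slice t (some i) (some (i + (e.length : Int))) == e)).filter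
      (fun i => ((i == 0) || !(PySem.Chars.isalnum (PySem.List.pyGetD t (i - 1) ' '))) &&
        ((i + (e.length : Int) == (t.length : Int)) ||
         !(PySem.Chars.isalnum (PySem.List.pyGetD t (i + (e.length : Int)) ' '))))

lemma pvStepSeg (t : List Char) (el : String × String) (out : List (Int × Int × String)) :
    pvAWhile t el.1.toList el.2 (t.length + 2)
      (PySem.Chars.find (PySem.Chars.lower t) (PySem.Chars.lower el.1.toList)) out =
    out ++ (pvASeg t el.1.toList).map (fun i => (i, i + (el.1.toList.length : Int), el.2)) := by
  rw [pvStep]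
  unfold pvASeg
  cases hfd : (PySem.List.pyRange 0 ((t.length : Int) + 1)).find?
      (fun i => PySem.List.slice (PySem.Chars.lower t) (some i)
        (some (i + (el.1.toList.length : Int))) == PySem.Chars.lower el.1.toList) with
  | none => simp
  | some p =>
    dsimp only
    rw [PySem.List.foldl_append_if
      (fun i => ((i == 0) || !(PySem.Chars.isalnum (PySem.List.pyGetD t (i - 1) ' '))) &&
        ((i + (el.1.toList.length : Int) == (t.length : Int)) ||
         !(PySem.Chars.isalnum (PySem.List.pyGetD t (i + (el.1.toList.length : Int)) ' '))))
      (fun i => (i, i + (el.1.toList.length : Int), el.2))]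

-- pvQ restated over the range: boundary test plus case-insensitive match
lemma pvQfromCi (t el : List Char) (i : Int)
    (hi : i ∈ PySem.List.pyRange 0 ((t.length : Int) + 1)) :
    pvQ t (PySem.Chars.lower el) i =
      ((fun i => ((i == 0) || !(PySem.Chars.isalnum (PySem.List.pyGetD t (i - 1) ' '))) &&
        ((i + (el.length : Int) == (t.length : Int)) ||
         !(PySem.Chars.isalnum (PySem.List.pyGetD t (i + (el.length : Int)) ' ')))) i &&
       (PySem.List.slice (PySem.Chars.lower t) (some i) (some (i + (el.length : Int))) ==
         PySem.Chars.lower el)) := by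
  have hklen : (PySem.Chars.lower el).length = el.length := by simp [PySem.Chars.lower]
  have hlowlen : (PySem.Chars.lower t).length = t.length := by simp [PySem.Chars.lower]
  have hmr := PySem.List.mem_pyRange_one.mp hi
  obtain ⟨iN, rfl⟩ : ∃ iN : Nat, i = ((iN : Nat) : Int) := ⟨i.toNat, by omega⟩
  rw [Bool.eq_iff_iff]
  simp only [pvQ, pvBd, Bool.and_eq_true]
  constructor
  · rintro ⟨⟨_, hbd⟩, hcis⟩
    rw [show (((PySem.Chars.lower el).length : Nat) : Int) = ((el.length : Nat) : Int)
      by rw [hklen]] at hbd hcis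
    exact ⟨hbd, hcis⟩
  · rintro ⟨hbd, hcis⟩
    rw [show ((el.length : Nat) : Int) = (((PySem.Chars.lower el).length : Nat) : Int)
      by rw [hklen]] at hbd hcis
    refine ⟨⟨?_, hbd⟩, hcis⟩
    rw [pvPredSlice, decide_eq_true_eq] at hcis
    have := hcis.length_le
    rw [List.length_drop, hklen, hlowlen] at this
    rw [decide_eq_true_eq, hklen]
    push_cast
    omega

-- A's positions form a sublist of B's positions
lemma pvASegSub (t e : List Char) :
    (pvASeg t e).Sublist
      ((PySem.List.pyRange 0 ((t.length : Int) + 1)).filter (pvQ t (PySem.Chars.lower e))) := by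
  have hklen : (PySem.Chars.lower e).length = e.length := by simp [PySem.Chars.lower]
  have hlowlen : (PySem.Chars.lower t).length = t.length := by simp [PySem.Chars.lower]
  have hlmap : ∀ (l : List Char), PySem.Chars.lower l = l.map PySem.Chars.lowerChar := fun _ => rfl
  unfold pvASeg
  by_cases hneg : PySem.Chars.find (PySem.Chars.lower t) (PySem.Chars.lower e) = -1
  · have hci : (PySem.List.pyRange 0 ((t.length : Int) + 1)).filter
        (fun i => PySem.List.slice (PySem.Chars.lower t) (some i)
          (some (i + (e.length : Int))) == PySem.Chars.lower e) = [] := by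
      have := pvFilterNil (PySem.Chars.lower t) (PySem.Chars.lower e) 0
        (by rw [List.drop_zero]; exact (PySem.Chars.find_eq_neg_one_iff _ _).mp hneg)
      simpa only [hlowlen, hklen, Nat.cast_zero] using this
    rw [show (PySem.List.pyRange 0 ((t.length : Int) + 1)).find?
        (fun i => PySem.List.slice (PySem.Chars.lower t) (some i)
          (some (i + (e.length : Int))) == PySem.Chars.lower e) = none by
      rw [← List.head?_filter, hci]; rfl]
    exact List.nil_sublist _
  · have hpos : 0 ≤ PySem.Chars.find (PySem.Chars.lower t) (PySem.Chars.lower e) := by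
      have := PySem.Chars.neg_one_le_find (PySem.Chars.lower t) (PySem.Chars.lower e); omega
    obtain ⟨hpre', hmin'⟩ := PySem.Chars.find_spec (s := PySem.Chars.lower t)
      (sub := PySem.Chars.lower e) hpos
    have hle := PySem.Chars.find_le_length (PySem.Chars.lower t) (PySem.Chars.lower e)
    set f0 : Nat := (PySem.Chars.find (PySem.Chars.lower t) (PySem.Chars.lower e)).toNat with hf0
    have hci : (PySem.List.pyRange 0 ((t.length : Int) + 1)).filter
        (fun i => PySem.List.slice (PySem.Chars.lower t) (some i)
          (some (i + (e.length : Int))) == PySem.Chars.lower e) =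
        (f0 : Int) :: (PySem.List.pyRange ((f0 : Int) + 1) ((t.length : Int) + 1)).filter
          (fun i => PySem.List.slice (PySem.Chars.lower t) (some i)
            (some (i + (e.length : Int))) == PySem.Chars.lower e) := by
      have := pvFilterCons (PySem.Chars.lower t) (PySem.Chars.lower e) 0 f0 (by omega)
        (by rw [hlowlen] at hle; omega) hpre' (fun j _ hj => hmin' j hj)
      simpa only [hlowlen, hklen, Nat.cast_zero] using this
    rw [show (PySem.List.pyRange 0 ((t.length : Int) + 1)).find?
        (fun i => PySem.List.slice (PySem.Chars.lower t) (some i)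
          (some (i + (e.length : Int))) == PySem.Chars.lower e) = some ((f0 : Nat) : Int) by
      rw [← List.head?_filter, hci]; rfl]
    dsimp only
    -- exact matches are case-insensitive matches
    have hsub1 : ((PySem.List.pyRange ((f0 : Int) + 1) ((t.length : Int) + 1)).filter
        (fun i => PySem.List.slice t (some i) (some (i + (e.length : Int))) == e)).Sublist
        ((PySem.List.pyRange ((f0 : Int) + 1) ((t.length : Int) + 1)).filter
          (fun i => PySem.List.slice (PySem.Chars.lower t) (some i)
            (some (i + (e.length : Int))) == PySem.Chars.lower e)) := by
      have heq : (PySem.List.pyRange ((f0 : Int) + 1) ((t.length : Int) + 1)).filter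
          (fun i => PySem.List.slice t (some i) (some (i + (e.length : Int))) == e) =
          ((PySem.List.pyRange ((f0 : Int) + 1) ((t.length : Int) + 1)).filter
            (fun i => PySem.List.slice (PySem.Chars.lower t) (some i)
              (some (i + (e.length : Int))) == PySem.Chars.lower e)).filter
            (fun i => PySem.List.slice t (some i) (some (i + (e.length : Int))) == e) := by
        rw [List.filter_filter]
        apply List.filter_congr
        intro i hi
        have hmr := PySem.List.mem_pyRange_one.mp hi
        obtain ⟨iN, rfl⟩ : ∃ iN : Nat, i = ((iN : Nat) : Int) := ⟨i.toNat, by omega⟩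
        rw [Bool.eq_iff_iff, Bool.and_eq_true]
        constructor
        · intro hx
          refine ⟨hx, ?_⟩
          rw [pvPredSlice, decide_eq_true_eq] at hx
          rw [show ((e.length : Nat) : Int) = (((PySem.Chars.lower e).length : Nat) : Int)
            by rw [hklen], pvPredSlice, decide_eq_true_eq]
          rw [hlmap, hlmap, ← List.map_drop]
          exact List.IsPrefix.map _ hx
        · exact fun hx => hx.1
      rw [heq]
      exact List.filter_sublist
    have hsub2 := (List.Sublist.cons₂ ((f0 : Nat) : Int) hsub1).filter
      (fun i => ((i == 0) || !(PySem.Chars.isalnum (PySem.List.pyGetD t (i - 1) ' '))) &&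
        ((i + (e.length : Int) == (t.length : Int)) ||
         !(PySem.Chars.isalnum (PySem.List.pyGetD t (i + (e.length : Int)) ' '))))
    have heq2 : (((f0 : Nat) : Int) :: (PySem.List.pyRange ((f0 : Int) + 1) ((t.length : Int) + 1)).filter
          (fun i => PySem.List.slice (PySem.Chars.lower t) (some i)
            (some (i + (e.length : Int))) == PySem.Chars.lower e)).filter
          (fun i => ((i == 0) || !(PySem.Chars.isalnum (PySem.List.pyGetD t (i - 1) ' '))) &&
            ((i + (e.length : Int) == (t.length : Int)) ||
             !(PySem.Chars.isalnum (PySem.List.pyGetD t (i + (e.length : Int)) ' ')))) =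
        (PySem.List.pyRange 0 ((t.length : Int) + 1)).filter (pvQ t (PySem.Chars.lower e)) := by
      rw [← hci, List.filter_filter]
      symm
      exact List.filter_congr (fun i hi => pvQfromCi t e i hi)
    rw [← heq2]
    exact hsub2

-- at a D_ witness position B keeps a position A does not: strict length gap
lemma pvASegStrict (t e : List Char) (hb : pvBadHit t e = true) :
    (pvASeg t e).length <
      ((PySem.List.pyRange 0 ((t.length : Int) + 1)).filter (pvQ t (PySem.Chars.lower e))).length := by
  have hklen : (PySem.Chars.lower e).length = e.length := by simp [PySem.Chars.lower]
  have hlowlen : (PySem.Chars.lower t).length = t.length := by simp [PySem.Chars.lower]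
  simp only [pvBadHit, List.any_eq_true] at hb
  obtain ⟨i0, hi0r, hc⟩ := hb
  rw [decide_eq_true_eq] at hc
  obtain ⟨hfind, hci0, hnex, hL, hR⟩ := hc
  rw [List.mem_range] at hi0r
  have hi0m : i0 + e.length ≤ t.length := by
    have := hci0.length_le
    rw [List.length_drop, hklen, hlowlen] at this
    omega
  -- i0 passes pvQ
  have hq : pvQ t (PySem.Chars.lower e) ((i0 : Nat) : Int) = true := by
    simp only [pvQ, pvBd, Bool.and_eq_true]
    refine ⟨⟨?_, ?_, ?_⟩, ?_⟩
    · rw [decide_eq_true_eq, hklen]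
      push_cast
      omega
    · rcases Nat.eq_zero_or_pos i0 with rfl | hp
      · simp
      · rw [Bool.or_eq_true]
        right
        rw [show i0 = (i0 - 1) + 1 by omega, List.getD_cons_succ] at hL
        rw [show (((i0 : Nat) : Int) - 1) = ((i0 - 1 : Nat) : Int) by omega,
          PySem.List.pyGetD_natCast]
        simp [List.getD] at hL ⊢
        exact hL
    · rw [Bool.or_eq_true]
      rcases Nat.lt_or_ge (i0 + e.length) t.length with hlt | hge
      · right
        rw [show (((i0 : Nat) : Int) + (((PySem.Chars.lower e).length : Nat) : Int)) =
            ((i0 + e.length : Nat) : Int) by rw [hklen]; push_cast; ring,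
          PySem.List.pyGetD_natCast]
        simp [List.getD] at hR ⊢
        exact hR
      · left
        rw [beq_iff_eq, hklen]
        push_cast
        omega
    · rw [show (((i0 : Nat) : Int) + (((PySem.Chars.lower e).length : Nat) : Int)) =
          (((i0 : Nat) : Int) + (((PySem.Chars.lower e).length : Nat) : Int)) from rfl,
        pvPredSlice, decide_eq_true_eq]
      exact hci0
  have hmemQ : ((i0 : Nat) : Int) ∈
      (PySem.List.pyRange 0 ((t.length : Int) + 1)).filter (pvQ t (PySem.Chars.lower e)) :=
    List.mem_filter.mpr ⟨PySem.List.mem_pyRange_one.mpr (by omega), hq⟩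
  -- i0 is not among A's positions
  have hnotA : ((i0 : Nat) : Int) ∉ pvASeg t e := by
    intro hmem
    unfold pvASeg at hmem
    by_cases hneg : PySem.Chars.find (PySem.Chars.lower t) (PySem.Chars.lower e) = -1
    · exact (PySem.Chars.find_eq_neg_one_iff _ _).mp hneg (by
        apply (PySem.Chars.isIn_iff_infix _ _).mp
        apply (PySem.Chars.exists_prefix_drop_iff_isIn _ _).mp
        exact ⟨i0, hci0⟩)
    · have hpos : 0 ≤ PySem.Chars.find (PySem.Chars.lower t) (PySem.Chars.lower e) := by
        have := PySem.Chars.neg_one_le_find (PySem.Chars.lower t) (PySem.Chars.lower e); omega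
      obtain ⟨hpre', hmin'⟩ := PySem.Chars.find_spec (s := PySem.Chars.lower t)
        (sub := PySem.Chars.lower e) hpos
      have hle := PySem.Chars.find_le_length (PySem.Chars.lower t) (PySem.Chars.lower e)
      set f0 : Nat := (PySem.Chars.find (PySem.Chars.lower t) (PySem.Chars.lower e)).toNat with hf0
      have hfv : PySem.Chars.find (PySem.Chars.lower t) (PySem.Chars.lower e) = (f0 : Int) := by omega
      have hci : (PySem.List.pyRange 0 ((t.length : Int) + 1)).filter
          (fun i => PySem.List.slice (PySem.Chars.lower t) (some i)
            (some (i + (e.length : Int))) == PySem.Chars.lower e) =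
          (f0 : Int) :: (PySem.List.pyRange ((f0 : Int) + 1) ((t.length : Int) + 1)).filter
            (fun i => PySem.List.slice (PySem.Chars.lower t) (some i)
              (some (i + (e.length : Int))) == PySem.Chars.lower e) := by
        have := pvFilterCons (PySem.Chars.lower t) (PySem.Chars.lower e) 0 f0 (by omega)
          (by rw [hlowlen] at hle; omega) hpre' (fun j _ hj => hmin' j hj)
        simpa only [hlowlen, hklen, Nat.cast_zero] using this
      rw [show (PySem.List.pyRange 0 ((t.length : Int) + 1)).find?
          (fun i => PySem.List.slice (PySem.Chars.lower t) (some i)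
            (some (i + (e.length : Int))) == PySem.Chars.lower e) = some ((f0 : Nat) : Int) by
        rw [← List.head?_filter, hci]; rfl] at hmem
      dsimp only at hmem
      have hmem' := (List.mem_filter.mp hmem).1
      rcases List.mem_cons.mp hmem' with heq | htl
      · rw [hfv] at hfind
        have : ((i0 : Nat) : Int) = ((f0 : Nat) : Int) := heq
        omega
      · have := (List.mem_filter.mp htl).2
        rw [pvPredSlice, decide_eq_true_eq] at this
        exact hnex this
  exact lt_of_le_of_ne ((pvASegSub t e).length_le) (fun hlen =>
    hnotA ((List.Sublist.length_eq (pvASegSub t e)).mp hlen ▸ hmemQ))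

-- pointwise ≤ makes the sums ≤; with one strict spot, strictly smaller
lemma pvSumLe {α : Type} (f g : α → Nat) :
    ∀ (l : List α), (∀ x ∈ l, f x ≤ g x) → (l.map f).sum ≤ (l.map g).sum := by
  intro l
  induction l with
  | nil => intro _; simp
  | cons x xs ih =>
    intro hle
    simp only [List.map_cons, List.sum_cons]
    have h1 := hle x (by simp)
    have h2 := ih (fun y hy => hle y (by simp [hy]))
    omega

lemma pvSumLt {α : Type} (f g : α → Nat) :
    ∀ (l : List α), (∀ x ∈ l, f x ≤ g x) → ∀ x0 ∈ l, f x0 < g x0 →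
    (l.map f).sum < (l.map g).sum := by
  intro l
  induction l with
  | nil => intro _ x0 h; cases h
  | cons x xs ih =>
    intro hle x0 hx0 hlt
    simp only [List.map_cons, List.sum_cons]
    rcases List.mem_cons.mp hx0 with heq | hxs
    · subst heq
      have h2 := pvSumLe f g xs (fun y hy => hle y (by simp [hy]))
      omega
    · have h1 := hle x (by simp)
      have h2 := ih (fun y hy => hle y (by simp [hy])) x0 hxs hlt
      omega

-- ===== VERDICT (by name: the statements are the Claim_ definitions above) =====
theorem assign_custom_ner_tags_with_spans_spec : Claim_unchanged_assign_custom_ner_tags_with_spans := by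
  intro text ed _
  unfold Spec_assign_custom_ner_tags_with_spans
  intro hD
  simp only [assign_custom_ner_tags_with_spans, assign_custom_ner_tags_with_spans_alt]
  refine Eq.trans (pvTop _ _ _ [] ?_) (List.nil_append _)
  intro el hel out
  have hbad : pvBadHit text.toList el.1.toList = false := by
    rw [D_assign_custom_ner_tags_with_spans] at hD
    rw [Bool.not_eq_true] at hD
    rw [List.any_eq_false] at hD
    have hel' := (PySem.List.mem_sorted _ _ _ _).mp hel
    obtain ⟨lw, hlw, hmem⟩ := List.mem_flatMap.mp hel'
    obtain ⟨e, he, rfl⟩ := List.mem_map.mp hmem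
    have h2 := hD lw hlw
    rw [Bool.not_eq_true, List.any_eq_false] at h2
    have h3 := h2 e he
    rwa [Bool.not_eq_true] at h3
  have hlen : PySem.Str.len el.1 = ((el.1.toList.length : Nat) : Int) := rfl
  have hklen : (PySem.Chars.lower el.1.toList).length = el.1.toList.length := by
    simp [PySem.Chars.lower]
  rw [pvStep text.toList el out, pvFlatten]
  rw [pvHitsGetD text.toList _ _ ?nodup ?pos (PySem.Chars.lower el.1.toList) ?tgt ?len]
  case nodup =>
    exact ((PySem.List.sorted_perm _ _ _).nodup_iff).mpr (PySem.Set.nodup_ofList _)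
  case pos =>
    intro x hx
    have := (PySem.Set.mem_ofList _ _).mp ((PySem.List.mem_sorted _ _ _ _).mp hx)
    obtain ⟨p, _, rfl⟩ := List.mem_map.mp this
    have : PySem.Str.len p.1 = ((p.1.toList.length : Nat) : Int) := rfl
    rw [this]
    positivity
  case tgt =>
    exact (PySem.Set.mem_ofList _ _).mpr (List.mem_map.mpr ⟨el, hel, rfl⟩)
  case len =>
    apply (PySem.List.mem_sorted _ _ _ _).mpr
    apply (PySem.Set.mem_ofList _ _).mpr
    apply List.mem_map.mpr
    exact ⟨el, hel, by rw [hklen]; exact hlen.symm ▸ rfl⟩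
  rw [hlen]
  exact pvSegEq text.toList el.1.toList el.2 out hbad

theorem assign_custom_ner_tags_with_spans_changed : Claim_changed_assign_custom_ner_tags_with_spans := by
  unfold Claim_changed_assign_custom_ner_tags_with_spans; decide

theorem assign_custom_ner_tags_with_spans_tight : Claim_exact_assign_custom_ner_tags_with_spans := by
  intro text ed _ hD heq
  simp only [assign_custom_ner_tags_with_spans, assign_custom_ner_tags_with_spans_alt] at heq
  rw [pvTop _ _ _ [] (fun el _ out => pvStepSeg text.toList el out), List.nil_append,
    pvFlatten] at heq
  set t := text.toList with ht
  set pairs := PySem.List.sorted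
      ((PySem.Dict.ofList ed).items.flatMap (fun lw => lw.2.map (fun e => (e, lw.1))))
      (fun x => PySem.Str.len x.1) true with hpairs
  set lengths := PySem.List.sorted (PySem.Set.ofList (pairs.map (fun p => PySem.Str.len p.1)))
      (fun x => x) false with hlens
  set targets : PySem.Set (List Char) :=
      PySem.Set.ofList (pairs.map (fun p => PySem.Chars.lower p.1.toList)) with htgts
  set hits := ((PySem.List.pyRange 0 ((t.length : Int) + 1)).flatMap
      (pvCf t lengths targets)).foldl (fun d p => d.modify p.1 [] (· ++ [p.2]))
      PySem.Dict.empty with hhits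
  have hGetD : ∀ el ∈ pairs, hits.getD (PySem.Chars.lower el.1.toList) [] =
      (PySem.List.pyRange 0 ((t.length : Int) + 1)).filter (pvQ t (PySem.Chars.lower el.1.toList)) := by
    intro el hel
    have hklen : (PySem.Chars.lower el.1.toList).length = el.1.toList.length := by
      simp [PySem.Chars.lower]
    rw [hhits]
    refine pvHitsGetD t lengths targets ?_ ?_ _ ?_ ?_
    · exact ((PySem.List.sorted_perm _ _ _).nodup_iff).mpr (PySem.Set.nodup_ofList _)
    · intro x hx
      have := (PySem.Set.mem_ofList _ _).mp ((PySem.List.mem_sorted _ _ _ _).mp hx)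
      obtain ⟨p, _, rfl⟩ := List.mem_map.mp this
      have : PySem.Str.len p.1 = ((p.1.toList.length : Nat) : Int) := rfl
      rw [this]
      positivity
    · exact (PySem.Set.mem_ofList _ _).mpr (List.mem_map.mpr ⟨el, hel, rfl⟩)
    · apply (PySem.List.mem_sorted _ _ _ _).mpr
      apply (PySem.Set.mem_ofList _ _).mpr
      apply List.mem_map.mpr
      exact ⟨el, hel, by rw [hklen]; rfl⟩
  have hlen := congrArg List.length heq
  rw [List.length_flatMap, List.length_flatMap] at hlen
  have hlepair : ∀ el ∈ pairs,
      ((pvASeg t el.1.toList).map (fun i => (i, i + (el.1.toList.length : Int), el.2))).length ≤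
      ((hits.getD (PySem.Chars.lower el.1.toList) []).map
        (fun i => (i, i + PySem.Str.len el.1, el.2))).length := by
    intro el hel
    rw [List.length_map, List.length_map, hGetD el hel]
    exact (pvASegSub t el.1.toList).length_le
  rw [D_assign_custom_ner_tags_with_spans] at hD
  rw [List.any_eq_true] at hD
  obtain ⟨lw, hlw, hin⟩ := hD
  rw [List.any_eq_true] at hin
  obtain ⟨e0, he0, hb⟩ := hin
  have hx0 : ((e0, lw.1) : String × String) ∈ pairs :=
    (PySem.List.mem_sorted _ _ _ _).mpr
      (List.mem_flatMap.mpr ⟨lw, hlw, List.mem_map.mpr ⟨e0, he0, rfl⟩⟩)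
  have hstrict :
      ((pvASeg t (e0, lw.1).1.toList).map
        (fun i => (i, i + ((e0, lw.1).1.toList.length : Int), (e0, lw.1).2))).length <
      ((hits.getD (PySem.Chars.lower (e0, lw.1).1.toList) []).map
        (fun i => (i, i + PySem.Str.len (e0, lw.1).1, (e0, lw.1).2))).length := by
    rw [List.length_map, List.length_map, hGetD _ hx0]
    exact pvASegStrict t e0.toList hb
  exact absurd hlen (Nat.ne_of_lt (pvSumLt _ _ pairs hlepair _ hx0 hstrict))
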